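-- pv_equiv track=rewrite | github.com/akira215/pyHydrostatics | polygon.py | newPolygon
-- ===== SOURCE A (Python) =====
-- def nextVertex(n:int,i:int,di:int)->int:
--     ''' return the circular next vertex '''
--     return (i+di)%n
--
-- def newPolygon(polygon:list,start:int,end:int)->list:
--     ''' Generate a polygone from indice start to end,
--     considering the cyclic condition'''
--     n = len(polygon)
--     p = []
--     i = start
--     while i!=end:
--         p.append(polygon[i])
--         i = nextVertex(n,i,1)
--     p.append(polygon[end])
--     return p
-- ===== SOURCE B (Python) =====
-- def newPolygon(polygon, start, end):
--     ''' Generate a polygone from indice start to end,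
--     considering the cyclic condition'''
--     n = len(polygon)
--     s = start % n
--     e = end % n
--     if start == end:
--         return [polygon[e]]
--     if s < e:
--         return polygon[s:e + 1]
--     return polygon[s:] + polygon[:e + 1]
-- ===== Notes on version B (the rewrite author's own statement) =====
-- stated objective: idiomatic
-- what changed: Replaces the element-by-element cyclic index walk (while loop with (i+1)%n and append) by index normalisation plus one or two list slices: polygon[s:e+1] when s<e, polygon[s:]+polygon[:e+1] otherwise, and a singleton when start==end.
import Mathlib
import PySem

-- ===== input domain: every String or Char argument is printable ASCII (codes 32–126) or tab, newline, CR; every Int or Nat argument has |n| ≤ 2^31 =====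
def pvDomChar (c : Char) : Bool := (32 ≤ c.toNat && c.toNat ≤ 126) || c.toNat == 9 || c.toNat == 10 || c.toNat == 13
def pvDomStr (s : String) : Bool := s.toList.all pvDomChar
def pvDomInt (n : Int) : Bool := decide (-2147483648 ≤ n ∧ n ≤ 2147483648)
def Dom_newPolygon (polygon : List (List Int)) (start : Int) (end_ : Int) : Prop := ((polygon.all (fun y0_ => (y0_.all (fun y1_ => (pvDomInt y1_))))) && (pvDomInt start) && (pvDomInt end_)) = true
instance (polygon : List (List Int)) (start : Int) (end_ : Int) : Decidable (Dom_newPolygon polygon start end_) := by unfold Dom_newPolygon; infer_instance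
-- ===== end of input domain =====

-- B replaces A's element-by-element cyclic index walk by index normalisation plus one or two slices (idiomatic; same O(n) cost).


-- ===== PORT A =====
def nextVertex (n : Int) (i : Int) (di : Int) : Int := PySem.Int.mod (i + di) n

-- the 'while i != end' loop of A; fuel (length+1) exceeds the step count on every input of Pre_
def newPolygonGo (polygon : List (List Int)) (end_ : Int) : Nat → Int → List (List Int) → List (List Int)
  | 0, _, p => p
  | fuel + 1, i, p =>
      if i ≠ end_ then
        newPolygonGo polygon end_ fuel (nextVertex (polygon.length : Int) i 1)
          (p ++ [PySem.List.pyGetD polygon i []])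
      else p

def newPolygon (polygon : List (List Int)) (start : Int) (end_ : Int) : List (List Int) :=
  let p := newPolygonGo polygon end_ (polygon.length + 1) start []
  p ++ [PySem.List.pyGetD polygon end_ []]

-- ===== PORT B =====
def newPolygon_alt (polygon : List (List Int)) (start : Int) (end_ : Int) : List (List Int) :=
  let n : Int := polygon.length
  let s := PySem.Int.mod start n
  let e := PySem.Int.mod end_ n
  if start = end_ then [PySem.List.pyGetD polygon e []]
  else if s < e then PySem.List.slice polygon (some s) (some (e + 1))
  else PySem.List.slice polygon (some s) none ++ PySem.List.slice polygon none (some (e + 1))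

-- ===== PRECONDITION & SPEC =====
-- Pre_ is exactly where the Python A returns: an empty polygon raises ZeroDivisionError/IndexError, an index
-- outside [-n, n) raises IndexError, and a negative 'end' different from 'start' makes A's while loop diverge.
def Pre_newPolygon (polygon : List (List Int)) (start : Int) (end_ : Int) : Prop :=
  0 < polygon.length ∧ -(polygon.length : Int) ≤ start ∧ start < (polygon.length : Int) ∧
  -(polygon.length : Int) ≤ end_ ∧ end_ < (polygon.length : Int) ∧ (0 ≤ end_ ∨ start = end_)
instance (polygon : List (List Int)) (start : Int) (end_ : Int) : Decidable (Pre_newPolygon polygon start end_) := by unfold Pre_newPolygon; infer_instance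

def pvWitness_newPolygon : List (List Int) × Int × Int := ([[1], [2], [3]], 2, 0)

def Spec_newPolygon (polygon : List (List Int)) (start : Int) (end_ : Int) (out : List (List Int)) : Prop := out = newPolygon_alt polygon start end_
instance (polygon : List (List Int)) (start : Int) (end_ : Int) (out : List (List Int)) : Decidable (Spec_newPolygon polygon start end_ out) := by unfold Spec_newPolygon; infer_instance

-- ===== CLAIM (what is proved, stated in full; the proofs are below) =====
def Claim_equal_newPolygon : Prop := ∀ (polygon : List (List Int)) (start : Int) (end_ : Int), Dom_newPolygon polygon start end_ → Pre_newPolygon polygon start end_ → Spec_newPolygon polygon start end_ (newPolygon polygon start end_)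

-- ===== LEMMAS AND PROOFS =====

-- small emod facts for a positive modulus
lemma em_small {a n : Int} (h1 : 0 ≤ a) (h2 : a < n) : a % n = a := Int.emod_eq_of_lt h1 h2

lemma em_neg {a n : Int} (_hn : 0 < n) (h1 : -n ≤ a) (h2 : a < 0) : a % n = a + n := by
  have h : (a + 1 * n) % n = a % n := Int.add_mul_emod_self_right _ _ _
  have : a + 1 * n = a + n := by ring
  rw [this] at h
  rw [← h, Int.emod_eq_of_lt (by omega) (by omega)]

lemma em_high {a n : Int} (_hn : 0 < n) (h1 : n ≤ a) (h2 : a < 2 * n) : a % n = a - n := by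
  have h : (a - n + 1 * n) % n = (a - n) % n := Int.add_mul_emod_self_right _ _ _
  have e : a - n + 1 * n = a := by ring
  rw [e] at h
  rw [h, Int.emod_eq_of_lt (by omega) (by omega)]

lemma em_add_left {a b n : Int} : (a % n + b) % n = (a + b) % n := by
  rw [Int.add_emod, Int.emod_emod_of_dvd _ dvd_rfl, ← Int.add_emod]

lemma em_add_n {a n : Int} : (a + n) % n = a % n := by
  rw [show a + n = a + 1 * n by ring]
  exact Int.add_mul_emod_self_right _ _ _

lemma em_add_right {a b n : Int} : (a + b % n) % n = (a + b) % n := by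
  rw [add_comm a (b % n), em_add_left, add_comm]

lemma em_sub_right {a b n : Int} : (a - b % n) % n = (a - b) % n := by
  rw [Int.sub_emod, Int.emod_emod_of_dvd _ dvd_rfl, ← Int.sub_emod]

lemma em_zero_small {a n : Int} (hn : 0 < n) (h1 : -n < a) (h2 : a < n) (h : a % n = 0) : a = 0 := by
  by_cases h3 : 0 ≤ a
  · rw [em_small h3 h2] at h; exact h
  · rw [em_neg hn (by omega) (by omega)] at h; omega

-- pyGetD is invariant under normalising an in-range Python index by % length
lemma pyGetD_emod (xs : List (List Int)) (i : Int) (hn : 0 < xs.length)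
    (h1 : -(xs.length : Int) ≤ i) (h2 : i < (xs.length : Int)) :
    PySem.List.pyGetD xs i [] = PySem.List.pyGetD xs (i % (xs.length : Int)) [] := by
  by_cases h0 : 0 ≤ i
  · rw [em_small h0 h2]
  · rw [em_neg (by exact_mod_cast hn) h1 (by omega)]
    unfold PySem.List.pyGetD PySem.List.pyGet? PySem.List.pyIdx?
    rw [if_neg h0, if_pos h1, if_pos (show (0:Int) ≤ i + xs.length by omega),
      if_pos (show i + (xs.length:Int) < (xs.length:Int) by omega)]
    have hix : xs.length - (-i).toNat = (i + (xs.length:Int)).toNat := by omega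
    rw [hix]

-- the loop invariant of A's while loop, for a loop index already in [0, n)
lemma go_spec (xs : List (List Int)) (e : Int) (he0 : 0 ≤ e) (hen : e < (xs.length : Int)) :
    ∀ d : Nat, ∀ i : Int, 0 ≤ i → i < (xs.length : Int) → ((e - i) % (xs.length : Int)).toNat = d →
    ∀ fuel : Nat, d < fuel → ∀ acc : List (List Int),
    newPolygonGo xs e fuel i acc =
      acc ++ (List.range d).map (fun (j : Nat) => PySem.List.pyGetD xs ((i + (j : Int)) % (xs.length : Int)) []) := by
  intro d
  induction d with
  | zero =>
    intro i hi0 hi1 hd fuel hf acc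
    have hn' : (0:Int) < xs.length := by omega
    have hz : (e - i) % (xs.length:Int) = 0 := by
      have := Int.emod_nonneg (e - i) (show (xs.length:Int) ≠ 0 by omega)
      omega
    have he : e - i = 0 := em_zero_small hn' (by omega) (by omega) hz
    obtain ⟨f, rfl⟩ : ∃ f, fuel = f + 1 := ⟨fuel - 1, by omega⟩
    have : i = e := by omega
    simp [newPolygonGo, this]
  | succ d ih =>
    intro i hi0 hi1 hd fuel hf acc
    have hn' : (0:Int) < (xs.length : Int) := by omega
    have hmn : 0 ≤ (e - i) % (xs.length : Int) := Int.emod_nonneg _ (by omega)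
    have hmlt : (e - i) % (xs.length : Int) < (xs.length : Int) := Int.emod_lt_of_pos _ hn'
    have hm : (e - i) % (xs.length : Int) = (d:Int) + 1 := by omega
    have hine : i ≠ e := by
      intro h
      rw [h] at hm
      simp at hm
      omega
    obtain ⟨f, rfl⟩ : ∃ f, fuel = f + 1 := ⟨fuel - 1, by omega⟩
    have step : newPolygonGo xs e (f + 1) i acc =
        newPolygonGo xs e f ((i + 1) % (xs.length : Int)) (acc ++ [PySem.List.pyGetD xs i []]) := by
      simp [newPolygonGo, hine, nextVertex, PySem.Int.mod_eq_emod_of_pos hn']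
    have hi' : 0 ≤ (i + 1) % (xs.length : Int) := Int.emod_nonneg _ (by omega)
    have hi'2 : (i + 1) % (xs.length : Int) < (xs.length : Int) := Int.emod_lt_of_pos _ hn'
    have hd' : ((e - (i + 1) % (xs.length : Int)) % (xs.length : Int)).toNat = d := by
      have e1 : (e - (i + 1) % (xs.length : Int)) % (xs.length : Int) = (e - (i + 1)) % (xs.length : Int) := by
        rw [Int.sub_emod, Int.emod_emod_of_dvd _ dvd_rfl, ← Int.sub_emod]
      have e2 : (e - (i + 1)) % (xs.length : Int) = (e - i) % (xs.length : Int) - 1 := by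
        have h3 : e - (i + 1) = e - i - 1 := by ring
        calc (e - (i + 1)) % (xs.length : Int)
            = ((e - i) % (xs.length : Int) - 1 % (xs.length : Int)) % (xs.length : Int) := by
              rw [h3, Int.sub_emod]
          _ = ((e - i) % (xs.length : Int) - 1) % (xs.length : Int) := by
              rw [show (1:Int) % (xs.length : Int) = 1 from em_small (by omega) (by omega)]
          _ = (e - i) % (xs.length : Int) - 1 := em_small (by omega) (by omega)
      rw [e1, e2, hm]
      omega
    rw [step, ih _ hi' hi'2 hd' f (by omega) _, List.append_assoc]
    congr 1
    rw [List.range_succ_eq_map, List.map_cons, List.map_map, List.singleton_append]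
    congr 1
    · rw [show i + ((0:Nat):Int) = i by simp, em_small hi0 hi1]
    · apply List.map_congr_left
      intro j hj
      simp only [Function.comp]
      rw [em_add_left]
      congr 2
      push_cast
      ring

-- A's result as a canonical cyclic-range map (case start ≠ end_)
lemma canon_A (xs : List (List Int)) (start end_ : Int) (hn : 0 < xs.length)
    (hs1 : -(xs.length : Int) ≤ start) (hs2 : start < (xs.length : Int))
    (he0 : 0 ≤ end_) (he2 : end_ < (xs.length : Int)) (hne : start ≠ end_) :
    newPolygon xs start end_ =
      (List.range ((if start % (xs.length : Int) < end_ then end_ - start % (xs.length : Int)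
        else (xs.length : Int) - start % (xs.length : Int) + end_).toNat + 1)).map
        (fun (j : Nat) => PySem.List.pyGetD xs ((start % (xs.length : Int) + (j : Int)) % (xs.length : Int)) []) := by
  have hn' : (0:Int) < (xs.length : Int) := by exact_mod_cast hn
  simp only [newPolygon]
  by_cases h0 : 0 ≤ start
  · -- nonnegative start: the loop runs ((end_ - start) % n) steps
    have hs : start % (xs.length : Int) = start := em_small h0 hs2
    rw [hs]
    have hd0 : 0 ≤ (end_ - start) % (xs.length : Int) := Int.emod_nonneg _ (by omega)
    have hdlt : (end_ - start) % (xs.length : Int) < (xs.length : Int) := Int.emod_lt_of_pos _ hn'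
    have hgo := go_spec xs end_ he0 he2 ((end_ - start) % (xs.length : Int)).toNat start h0 hs2 rfl
      (xs.length + 1) (by omega) []
    rw [hgo, List.nil_append]
    have hD : (if start < end_ then end_ - start else (xs.length : Int) - start + end_).toNat
        = ((end_ - start) % (xs.length : Int)).toNat := by
      by_cases hlt : start < end_
      · rw [if_pos hlt, em_small (by omega) (by omega)]
      · rw [if_neg hlt, em_neg hn' (by omega) (by omega)]
        omega
    rw [hD, List.range_succ, List.map_append, List.map_cons, List.map_nil]
    congr 2
    have hcast : ((((end_ - start) % (xs.length : Int)).toNat : Nat) : Int)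
        = (end_ - start) % (xs.length : Int) := by omega
    rw [hcast]
    have : (start + (end_ - start) % (xs.length : Int)) % (xs.length : Int) = end_ := by
      rw [em_add_right, show start + (end_ - start) = end_ by ring, em_small he0 he2]
    rw [this]
  · -- negative start: peel the first iteration, then the loop index is in [0, n)
    have hs : start % (xs.length : Int) = start + (xs.length : Int) := em_neg hn' hs1 (by omega)
    rw [hs]
    have step : newPolygonGo xs end_ (xs.length + 1) start [] =
        newPolygonGo xs end_ xs.length ((start + 1) % (xs.length : Int))
          [PySem.List.pyGetD xs start []] := by
      simp [newPolygonGo, hne, nextVertex, PySem.Int.mod_eq_emod_of_pos hn']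
    have hi'0 : 0 ≤ (start + 1) % (xs.length : Int) := Int.emod_nonneg _ (by omega)
    have hi'1 : (start + 1) % (xs.length : Int) < (xs.length : Int) := Int.emod_lt_of_pos _ hn'
    have hgo := go_spec xs end_ he0 he2 ((end_ - (start + 1) % (xs.length : Int)) % (xs.length : Int)).toNat
      ((start + 1) % (xs.length : Int)) hi'0 hi'1 rfl xs.length
      (by
        have := Int.emod_lt_of_pos (end_ - (start + 1) % (xs.length : Int)) hn'
        have := Int.emod_nonneg (end_ - (start + 1) % (xs.length : Int)) (show (xs.length:Int) ≠ 0 by omega)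
        omega)
      [PySem.List.pyGetD xs start []]
    rw [step, hgo]
    -- the number of remaining steps
    have hd'val : (end_ - (start + 1) % (xs.length : Int)) % (xs.length : Int) =
        (if start + (xs.length : Int) < end_ then end_ - (start + (xs.length : Int))
          else (xs.length : Int) - (start + (xs.length : Int)) + end_) - 1 := by
      rw [em_sub_right]
      by_cases hlt : start + (xs.length : Int) < end_
      · rw [if_pos hlt, em_high hn' (by omega) (by omega)]
        ring
      · rw [if_neg hlt, em_small (by omega) (by omega)]
        ring
    have hD : (if start + (xs.length : Int) < end_ then end_ - (start + (xs.length : Int))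
          else (xs.length : Int) - (start + (xs.length : Int)) + end_).toNat
        = ((end_ - (start + 1) % (xs.length : Int)) % (xs.length : Int)).toNat + 1 := by
      have h1 : 0 ≤ (end_ - (start + 1) % (xs.length : Int)) % (xs.length : Int) :=
        Int.emod_nonneg _ (by omega)
      omega
    rw [hD, List.range_succ_eq_map, List.map_cons, List.map_map, List.singleton_append,
      List.cons_append]
    congr 1
    · -- first element
      rw [show (start + (xs.length : Int) + ((0:Nat):Int)) = start + (xs.length : Int) by simp,
        em_add_n]
      exact pyGetD_emod xs start hn hs1 hs2
    · -- remaining elements, with the final append folded in as the last of the range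
      rw [List.range_succ, List.map_append, List.map_cons, List.map_nil]
      congr 1
      · apply List.map_congr_left
        intro j hj
        simp only [Function.comp]
        rw [em_add_left]
        congr 1
        rw [show start + (xs.length : Int) + ((Nat.succ j : Nat) : Int)
            = (start + 1 + (j : Int)) + (xs.length : Int) by push_cast; ring, em_add_n]
      · simp only [Function.comp]
        have hc : ((((end_ - (start + 1) % (xs.length : Int)) % (xs.length : Int)).toNat : Nat) : Int)
            = (end_ - (start + 1) % (xs.length : Int)) % (xs.length : Int) := by
          have := Int.emod_nonneg (end_ - (start + 1) % (xs.length : Int)) (show (xs.length:Int) ≠ 0 by omega)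
          omega
        have hE : (start + (xs.length : Int) +
              ((Nat.succ (((end_ - (start + 1) % (xs.length : Int)) % (xs.length : Int)).toNat) : Nat) : Int))
              % (xs.length : Int) = end_ := by
          rw [show ((Nat.succ (((end_ - (start + 1) % (xs.length : Int)) % (xs.length : Int)).toNat) : Nat) : Int)
              = (((((end_ - (start + 1) % (xs.length : Int)) % (xs.length : Int)).toNat : Nat) : Int)) + 1 by push_cast; ring,
            hc,
            show start + (xs.length : Int) + ((end_ - (start + 1) % (xs.length : Int)) % (xs.length : Int) + 1)
              = (start + 1 + (end_ - (start + 1) % (xs.length : Int)) % (xs.length : Int)) + (xs.length : Int) by ring,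
            em_add_n, em_add_right,
            show start + 1 + (end_ - (start + 1) % (xs.length : Int))
              = (start + 1 + end_) - (start + 1) % (xs.length : Int) by ring,
            em_sub_right,
            show (start + 1 + end_ - (start + 1)) = end_ by ring,
            em_small he0 he2]
        rw [hE]


-- a straight segment of the cyclic map is a slice
lemma map_range_eq_slice (xs : List (List Int)) (s e : Int) (h0 : 0 ≤ s) (hse : s ≤ e)
    (he : e < (xs.length : Int)) :
    (List.range ((e - s).toNat + 1)).map
        (fun (j : Nat) => PySem.List.pyGetD xs ((s + (j : Int)) % (xs.length : Int)) []) =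
      PySem.List.slice xs (some s) (some (e + 1)) := by
  rw [PySem.List.slice_toNat xs h0 (by omega)]
  apply List.ext_getElem
  · simp only [List.length_map, List.length_range, List.length_take, List.length_drop]
    omega
  · intro k h1 h2
    simp only [List.getElem_map, List.getElem_range]
    have hk : (k : Int) ≤ e - s := by
      simp only [List.length_map, List.length_range] at h1
      omega
    rw [em_small (by omega) (by omega),
      show s + (k : Int) = (((s.toNat + k : Nat)) : Int) by push_cast; omega,
      PySem.List.pyGetD_natCast, List.getD_eq_getElem _ _ (by omega),
      List.getElem_take, List.getElem_drop]

-- the wrapped segment of the cyclic map is drop ++ take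
lemma map_range_eq_wrap (xs : List (List Int)) (s e : Int) (h0 : 0 ≤ s) (hs : s < (xs.length : Int))
    (he0 : 0 ≤ e) (he : e < (xs.length : Int)) :
    (List.range (((xs.length : Int) - s + e).toNat + 1)).map
        (fun (j : Nat) => PySem.List.pyGetD xs ((s + (j : Int)) % (xs.length : Int)) []) =
      PySem.List.slice xs (some s) none ++ PySem.List.slice xs none (some (e + 1)) := by
  rw [PySem.List.slice_from xs h0, PySem.List.slice_to xs (by omega)]
  apply List.ext_getElem
  · simp only [List.length_map, List.length_range, List.length_append, List.length_take,
      List.length_drop]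
    omega
  · intro k h1 h2
    simp only [List.getElem_map, List.getElem_range]
    have hk : (k : Int) ≤ (xs.length : Int) - s + e := by
      simp only [List.length_map, List.length_range] at h1
      omega
    rw [List.getElem_append]
    by_cases hin : s + (k : Int) < (xs.length : Int)
    · rw [em_small (by omega) hin,
        show s + (k : Int) = (((s.toNat + k : Nat)) : Int) by push_cast; omega,
        PySem.List.pyGetD_natCast, List.getD_eq_getElem _ _ (by omega)]
      rw [dif_pos (by simp only [List.length_drop]; omega), List.getElem_drop]
    · rw [em_high (by omega) (by omega) (by omega),
        show s + (k : Int) - (xs.length : Int) = (((s.toNat + k - xs.length : Nat)) : Int) by omega,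
        PySem.List.pyGetD_natCast, List.getD_eq_getElem _ _ (by omega)]
      rw [dif_neg (by simp only [List.length_drop]; omega), List.getElem_take]
      congr 1
      simp only [List.length_drop]
      omega

-- ===== VERDICT (by name: the statement is the Claim_ definition above) =====
theorem newPolygon_spec : Claim_equal_newPolygon := by
  intro polygon start end_ _ hpre
  obtain ⟨hn, hs1, hs2, he1, he2, hend⟩ := hpre
  have hn' : (0:Int) < (polygon.length : Int) := by exact_mod_cast hn
  show newPolygon polygon start end_ = newPolygon_alt polygon start end_
  simp only [newPolygon_alt, PySem.Int.mod_eq_emod_of_pos hn']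
  by_cases heq : start = end_
  · subst heq
    rw [if_pos rfl]
    simp [newPolygon, newPolygonGo]
    exact pyGetD_emod polygon start hn hs1 hs2
  · have he0 : 0 ≤ end_ := hend.resolve_right heq
    rw [if_neg heq, em_small he0 he2, canon_A polygon start end_ hn hs1 hs2 he0 he2 heq]
    have hsm0 : 0 ≤ start % (polygon.length : Int) := Int.emod_nonneg _ (by omega)
    have hsm1 : start % (polygon.length : Int) < (polygon.length : Int) := Int.emod_lt_of_pos _ hn'
    by_cases hlt : start % (polygon.length : Int) < end_
    · rw [if_pos hlt, if_pos hlt]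
      exact map_range_eq_slice polygon _ end_ hsm0 (by omega) he2
    · rw [if_neg hlt, if_neg hlt]
      exact map_range_eq_wrap polygon _ end_ hsm0 hsm1 he0 he2
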